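-- pv_equiv track=rewrite | github.com/Melodiz/dailycode | Algorithms/some_intern_contests/yandex_winter/B_Vasia_and_kittens/test_check_function.py | can_place_entities_naive
-- ===== SOURCE A (Python) =====
-- from itertools import combinations
--
-- def can_place_entities_naive(n, m, k, bed_coords, occupied_beds, min_dist):
--     # Convert occupied beds to a set for quick lookup
--     occupied_set = set(occupied_beds)
--
--     # Calculate available beds by excluding occupied ones
--     available_beds = [bed for bed in bed_coords if bed not in occupied_set]
--
--     cats_to_place = n
--
--     # Generate all combinations of placing the cats_to_place on available beds
--     for combo in combinations(available_beds, cats_to_place):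
--         # Combine the occupied beds with the current combination
--         all_cats = list(combo) + occupied_beds
--
--         # Sort the positions of all cats
--         all_cats.sort()
--
--         # Calculate the minimum distance between any two cats
--         min_distance = min(all_cats[i+1] - all_cats[i] for i in range(len(all_cats) - 1))
--
--         # Check if the minimum distance is at least min_dist
--         if min_distance >= min_dist:
--             return True
--
--     return False
-- ===== SOURCE B (Python) =====
-- def can_place_entities_naive(n, m, k, bed_coords, occupied_beds, min_dist):
--     occ = sorted(occupied_beds)
--     # the occupied beds are part of every arrangement: their own spacing must be fine
--     for i in range(len(occ) - 1):
--         if occ[i + 1] - occ[i] < min_dist: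
--             return False
--     occ_set = set(occupied_beds)
--     avail = sorted(b for b in bed_coords if b not in occ_set)
--     placed = 0
--     j = 0           # pointer into occ
--     last = None     # previous cat position (placed or occupied) in the sweep
--     for p in avail:
--         while j < len(occ) and occ[j] <= p:
--             last = occ[j]
--             j += 1
--         if (last is None or p - last >= min_dist) and (j == len(occ) or occ[j] - p >= min_dist):
--             placed += 1
--             last = p
--     return placed >= n
-- ===== Notes on version B (the rewrite author's own statement) =====
-- stated objective: alternative
-- what changed: A tries every combination of n available beds (sorting and rescanning each); B does one greedy left-to-right sweep over the sorted available beds, threading the fixed occupied beds through it, and checks that the number of placeable cats reaches n.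
import Mathlib
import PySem

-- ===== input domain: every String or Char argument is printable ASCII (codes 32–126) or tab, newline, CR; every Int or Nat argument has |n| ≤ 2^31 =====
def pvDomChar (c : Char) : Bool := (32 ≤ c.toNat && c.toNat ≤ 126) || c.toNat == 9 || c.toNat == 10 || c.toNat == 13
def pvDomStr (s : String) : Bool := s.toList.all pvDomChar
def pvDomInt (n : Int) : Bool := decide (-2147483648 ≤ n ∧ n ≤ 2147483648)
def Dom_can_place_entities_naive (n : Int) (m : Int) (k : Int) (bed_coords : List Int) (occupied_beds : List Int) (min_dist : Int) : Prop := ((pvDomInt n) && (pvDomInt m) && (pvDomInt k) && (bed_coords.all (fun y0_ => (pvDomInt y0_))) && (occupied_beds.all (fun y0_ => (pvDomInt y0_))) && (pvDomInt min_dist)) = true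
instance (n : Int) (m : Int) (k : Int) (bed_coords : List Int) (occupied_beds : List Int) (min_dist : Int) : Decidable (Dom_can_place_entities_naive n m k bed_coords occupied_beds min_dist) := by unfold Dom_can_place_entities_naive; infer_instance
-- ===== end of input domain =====

-- B replaces A's exhaustive search over all C(|available|,n) combinations (each sorted and
-- re-scanned) by one sorted greedy sweep that places cats left to right around the fixed
-- occupied beds; objective: alternative (a genuinely different algorithm).

-- ===== PORT A =====
-- itertools.combinations(xs, r) in lexicographic order (exact for r ≤ len; r < 0 raises in
-- Python — those inputs are outside Pre_).
def pvCombos : Nat → List Int → List (List Int)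
  | 0, _ => [[]]
  | _ + 1, [] => []
  | r + 1, x :: xs => (pvCombos r xs).map (fun c => x :: c) ++ pvCombos (r + 1) xs

def can_place_entities_naive (n : Int) (m : Int) (k : Int) (bed_coords : List Int) (occupied_beds : List Int) (min_dist : Int) : Bool :=
  let occupied_set := PySem.Set.ofList occupied_beds
  let available_beds := bed_coords.filter (fun bed => !(PySem.Set.contains occupied_set bed))
  -- for combo in combinations(...): ... if min_distance >= min_dist: return True / return False
  (pvCombos n.toNat available_beds).any (fun combo =>
    let all_cats := PySem.List.sorted (combo ++ occupied_beds) (fun x => x) false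
    -- min(all_cats[i+1] - all_cats[i] for i in range(len(all_cats)-1)); indices are always in
    -- range so getD is exact; min of an empty generator raises in Python — outside Pre_.
    match PySem.List.min? ((List.range (all_cats.length - 1)).map
        (fun i => all_cats.getD (i + 1) 0 - all_cats.getD i 0)) (fun x => x) with
    | some md => decide (min_dist ≤ md)
    | none => false)

-- ===== PORT B =====
-- the inner 'while j < len(occ) and occ[j] <= p' loop of Source B
def pvPopLE (last : Option Int) (occs : List Int) (p : Int) : Option Int × List Int :=
  match occs with
  | [] => (last, [])
  | q :: rest => if q ≤ p then pvPopLE (some q) rest p else (last, q :: rest)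

def can_place_entities_naive_alt (n : Int) (m : Int) (k : Int) (bed_coords : List Int) (occupied_beds : List Int) (min_dist : Int) : Bool :=
  let occ := PySem.List.sorted occupied_beds (fun x => x) false
  -- for i in range(len(occ)-1): if occ[i+1]-occ[i] < min_dist: return False   (indices in range)
  if (List.range (occ.length - 1)).any
      (fun i => decide (occ.getD (i + 1) 0 - occ.getD i 0 < min_dist)) then false
  else
    let occ_set := PySem.Set.ofList occupied_beds
    let avail := PySem.List.sorted
      (bed_coords.filter (fun bed => !(PySem.Set.contains occ_set bed))) (fun x => x) false
    -- state (placed, last, remaining occ suffix); the while loop is pvPopLE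
    let st := avail.foldl (fun (st : Int × Option Int × List Int) p =>
        let pop := pvPopLE st.2.1 st.2.2 p
        if (pop.1.elim true (fun l => decide (min_dist ≤ p - l))) &&
           (pop.2.head?.elim true (fun q => decide (min_dist ≤ q - p))) then
          (st.1 + 1, some p, pop.2)
        else (st.1, pop.1, pop.2)) ((0 : Int), (none : Option Int), occ)
    decide (n ≤ st.1)

-- ===== PRECONDITION & SPEC =====
-- Pre_ excludes exactly the inputs on which the Python A raises ValueError: n < 0
-- (combinations with a negative r), and the case where a combination exists (n ≤ number of
-- available beds) but fewer than 2 cats exist in total, so 'min' is applied to an empty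
-- generator. A returns on every input satisfying Pre_.
def Pre_can_place_entities_naive (n : Int) (m : Int) (k : Int) (bed_coords : List Int) (occupied_beds : List Int) (min_dist : Int) : Prop :=
  0 ≤ n ∧ (2 ≤ n + occupied_beds.length ∨
    ((bed_coords.filter (fun b => b ∉ occupied_beds)).length : Int) < n)
instance (n : Int) (m : Int) (k : Int) (bed_coords : List Int) (occupied_beds : List Int) (min_dist : Int) : Decidable (Pre_can_place_entities_naive n m k bed_coords occupied_beds min_dist) := by unfold Pre_can_place_entities_naive; infer_instance

def pvWitness_can_place_entities_naive : Int × Int × Int × List Int × List Int × Int :=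
  (2, 0, 0, [0, 10, 20], [5], 3)

def Spec_can_place_entities_naive (n : Int) (m : Int) (k : Int) (bed_coords : List Int) (occupied_beds : List Int) (min_dist : Int) (out : Bool) : Prop := out = can_place_entities_naive_alt n m k bed_coords occupied_beds min_dist
instance (n : Int) (m : Int) (k : Int) (bed_coords : List Int) (occupied_beds : List Int) (min_dist : Int) (out : Bool) : Decidable (Spec_can_place_entities_naive n m k bed_coords occupied_beds min_dist out) := by unfold Spec_can_place_entities_naive; infer_instance

-- ===== CLAIM (what is proved, stated in full; the proofs are below) =====
def Claim_equal_can_place_entities_naive : Prop := ∀ (n : Int) (m : Int) (k : Int) (bed_coords : List Int) (occupied_beds : List Int) (min_dist : Int), Dom_can_place_entities_naive n m k bed_coords occupied_beds min_dist → Pre_can_place_entities_naive n m k bed_coords occupied_beds min_dist → Spec_can_place_entities_naive n m k bed_coords occupied_beds min_dist (can_place_entities_naive n m k bed_coords occupied_beds min_dist)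

-- ===== LEMMAS AND PROOFS =====

-- gap chain: consecutive elements of the list (prefixed by `last` if present) differ by ≥ d
def GapsOK (d : Int) : Option Int → List Int → Prop
  | _, [] => True
  | last, x :: xs => (∀ a ∈ last, d ≤ x - a) ∧ GapsOK d (some x) xs

-- merge of two sorted lists, second-list-first on ties (matches the sweep's 'occ[j] <= p')
def mrg : List Int → List Int → List Int
  | [], ys => ys
  | x :: xs, [] => x :: xs
  | x :: xs, y :: ys => if y ≤ x then y :: mrg (x :: xs) ys else x :: mrg xs (y :: ys)
  termination_by xs ys => xs.length + ys.length

-- one-step form of the greedy sweep (one occ popped, or one available bed decided, per step)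
def gcount (d : Int) : Option Int → List Int → List Int → Nat
  | _, [], _ => 0
  | last, p :: avs, q :: occs =>
    if q ≤ p then gcount d (some q) (p :: avs) occs
    else if (∀ a ∈ last, d ≤ p - a) ∧ d ≤ q - p then 1 + gcount d (some p) avs (q :: occs)
    else gcount d last avs (q :: occs)
  | last, p :: avs, [] =>
    if ∀ a ∈ last, d ≤ p - a then 1 + gcount d (some p) avs []
    else gcount d last avs []
  termination_by _ avs occs => avs.length + occs.length

def Feas (d : Int) (last : Option Int) (avs occs : List Int) (r : Nat) : Prop :=
  ∃ S : List Int, S.Sublist avs ∧ S.length = r ∧ GapsOK d last (mrg S occs)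

theorem mrg_nil_right (xs : List Int) : mrg xs [] = xs := by
  cases xs <;> simp [mrg]

theorem mrg_cons_right (xs : List Int) (y : Int) (ys : List Int)
    (h : ∀ x ∈ xs, y ≤ x) : mrg xs (y :: ys) = y :: mrg xs ys := by
  cases xs with
  | nil => simp [mrg]
  | cons x xs => simp [mrg, h x (by simp)]

theorem mrg_cons_left (x : Int) (xs ys : List Int)
    (h : ∀ y ∈ ys, x < y) : mrg (x :: xs) ys = x :: mrg xs ys := by
  cases ys with
  | nil => simp [mrg, mrg_nil_right]
  | cons y ys => simp [mrg, not_le.2 (h y (by simp))]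

theorem mrg_perm : ∀ (xs ys : List Int), (mrg xs ys).Perm (xs ++ ys)
  | [], ys => by simp [mrg]
  | x :: xs, [] => by simp [mrg]
  | x :: xs, y :: ys => by
    by_cases h : y ≤ x
    · simp only [mrg, if_pos h]
      exact ((mrg_perm (x :: xs) ys).cons y).trans List.perm_middle.symm
    · simp only [mrg, if_neg h]
      exact (mrg_perm xs (y :: ys)).cons x
  termination_by xs ys => xs.length + ys.length

theorem mem_mrg {z : Int} {xs ys : List Int} :
    z ∈ mrg xs ys ↔ z ∈ xs ∨ z ∈ ys := by
  rw [(mrg_perm xs ys).mem_iff, List.mem_append]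

theorem mrg_sorted : ∀ (xs ys : List Int), xs.Pairwise (· ≤ ·) → ys.Pairwise (· ≤ ·) →
    (mrg xs ys).Pairwise (· ≤ ·)
  | [], ys => fun _ h => by simpa [mrg] using h
  | x :: xs, [] => fun h _ => by simpa [mrg] using h
  | x :: xs, y :: ys => fun hx hy => by
    by_cases h : y ≤ x
    · simp only [mrg, if_pos h]
      refine List.pairwise_cons.2 ⟨?_, mrg_sorted (x :: xs) ys hx (List.pairwise_cons.1 hy).2⟩
      intro z hz
      rcases mem_mrg.1 hz with hz | hz
      · rcases List.mem_cons.1 hz with rfl | hz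
        · exact h
        · exact le_trans h ((List.pairwise_cons.1 hx).1 z hz)
      · exact (List.pairwise_cons.1 hy).1 z hz
    · simp only [mrg, if_neg h]
      refine List.pairwise_cons.2 ⟨?_, mrg_sorted xs (y :: ys) (List.pairwise_cons.1 hx).2 hy⟩
      intro z hz
      rcases mem_mrg.1 hz with hz | hz
      · exact (List.pairwise_cons.1 hx).1 z hz
      · rcases List.mem_cons.1 hz with rfl | hz
        · omega
        · have := (List.pairwise_cons.1 hy).1 z hz; omega
  termination_by xs ys => xs.length + ys.length

theorem gapsOK_weaken_none (d : Int) (a : Int) (l : List Int)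
    (h : GapsOK d (some a) l) : GapsOK d none l := by
  cases l with
  | nil => trivial
  | cons x xs => exact ⟨by simp, h.2⟩

theorem gapsOK_weaken (d p a : Int) (l : List Int) (hpa : p ≤ a)
    (h : GapsOK d (some a) l) : GapsOK d (some p) l := by
  cases l with
  | nil => trivial
  | cons x xs =>
    refine ⟨?_, h.2⟩
    intro b hb; simp at hb; subst hb
    have := h.1 a (by simp)
    omega

theorem gapsOK_reach (d a : Int) (l : List Int) (hd : 0 ≤ d)
    (h : GapsOK d (some a) l) : ∀ x ∈ l, d ≤ x - a := by
  induction l generalizing a with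
  | nil => simp
  | cons y ys ih =>
    intro x hx
    have h1 : d ≤ y - a := h.1 a (by simp)
    rcases List.mem_cons.1 hx with he | hx
    · omega
    · have := ih y h.2 x hx; omega

-- removing the chosen beds from a valid merged chain leaves a valid chain on the occupied beds
theorem gapsOK_rm (d : Int) (last : Option Int) (S occs : List Int)
    (hS : S.Pairwise (· ≤ ·)) (hoc : occs.Pairwise (· ≤ ·))
    (hlast : ∀ a ∈ last, (∀ x ∈ S, a ≤ x) ∧ (∀ x ∈ occs, a ≤ x))
    (h : GapsOK d last (mrg S occs)) : GapsOK d last occs := by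
  match S, occs with
  | [], occs => simpa [mrg] using h
  | s :: S, [] => trivial
  | s :: S, q :: occs =>
    by_cases hqs : q ≤ s
    · rw [mrg_cons_right _ _ _ (by
        intro x hx
        rcases List.mem_cons.1 hx with rfl | hx
        · exact hqs
        · exact le_trans hqs ((List.pairwise_cons.1 hS).1 x hx))] at h
      refine ⟨h.1, ?_⟩
      refine gapsOK_rm d (some q) (s :: S) occs hS (List.pairwise_cons.1 hoc).2 ?_ h.2
      intro a ha
      simp only [Option.mem_def, Option.some.injEq] at ha; subst ha
      constructor
      · intro x hx
        rcases List.mem_cons.1 hx with rfl | hx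
        · exact hqs
        · exact le_trans hqs ((List.pairwise_cons.1 hS).1 x hx)
      · exact (List.pairwise_cons.1 hoc).1
    · rw [mrg_cons_left _ _ _ (by
        intro y hy
        rcases List.mem_cons.1 hy with rfl | hy
        · omega
        · have := (List.pairwise_cons.1 hoc).1 y hy; omega)] at h
      have hrec : GapsOK d (some s) (q :: occs) := by
        refine gapsOK_rm d (some s) S (q :: occs) (List.pairwise_cons.1 hS).2 hoc ?_ h.2
        intro a ha
        simp only [Option.mem_def, Option.some.injEq] at ha; subst ha
        refine ⟨(List.pairwise_cons.1 hS).1, ?_⟩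
        intro x hx
        rcases List.mem_cons.1 hx with rfl | hx
        · omega
        · have := (List.pairwise_cons.1 hoc).1 x hx; omega
      refine ⟨?_, hrec.2⟩
      intro a ha
      have h1 := h.1 a ha
      have h2 : d ≤ q - s := hrec.1 s (by simp)
      omega
  termination_by S.length + occs.length

-- the exchange step: if p can be placed greedily, replacing the smallest chosen bed s1 by p
-- keeps the remaining chain valid
theorem gapsOK_exchange (d : Int) (occs : List Int)
    (hoc : occs.Pairwise (· ≤ ·)) (hchain : GapsOK d none occs)
    (p s1 : Int) (rest : List Int) (last : Option Int)
    (hps : p ≤ s1) (hrest : ∀ x ∈ rest, s1 ≤ x)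
    (hq : ∀ q ∈ occs.head?, d ≤ q - p)
    (h : GapsOK d last (mrg (s1 :: rest) occs)) :
    GapsOK d (some p) (mrg rest occs) := by
  induction occs generalizing p last with
  | nil =>
    rw [mrg_nil_right] at h
    rw [mrg_nil_right]
    exact gapsOK_weaken d p s1 rest hps h.2
  | cons q occs ih =>
    by_cases hq1 : q ≤ s1
    · rw [mrg_cons_right _ _ _ (by
        intro x hx
        rcases List.mem_cons.1 hx with rfl | hx
        · exact hq1
        · exact le_trans hq1 (hrest x hx))] at h
      rw [mrg_cons_right _ _ _ (fun x hx => le_trans hq1 (hrest x hx))]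
      refine ⟨?_, ?_⟩
      · intro a ha
        simp only [Option.mem_def, Option.some.injEq] at ha; subst ha
        exact hq q rfl
      · refine ih (List.pairwise_cons.1 hoc).2 (gapsOK_weaken_none d q occs hchain.2)
          q (some q) hq1 ?_ h.2
        intro q' hq'
        cases occs with
        | nil => simp at hq'
        | cons y ys =>
          simp only [List.head?_cons, Option.mem_def, Option.some.injEq] at hq'
          subst hq'
          exact hchain.2.1 q (by simp)
    · rw [mrg_cons_left _ _ _ (by
        intro y hy
        rcases List.mem_cons.1 hy with rfl | hy
        · omega
        · have := (List.pairwise_cons.1 hoc).1 y hy; omega)] at h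
      exact gapsOK_weaken d p s1 _ hps h.2

theorem gcount_le (d : Int) (last : Option Int) (avs occs : List Int) :
    gcount d last avs occs ≤ avs.length := by
  match avs, occs with
  | [], _ => simp [gcount]
  | p :: avs, q :: occs =>
    rw [gcount]
    split
    · exact gcount_le d (some q) (p :: avs) occs
    · split
      · have := gcount_le d (some p) avs (q :: occs); simp; omega
      · have := gcount_le d last avs (q :: occs); simp; omega
  | p :: avs, [] =>
    rw [gcount]
    split
    · have := gcount_le d (some p) avs []; simp; omega
    · have := gcount_le d last avs []; simp; omega
  termination_by avs.length + occs.length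

theorem gcount_sound (d : Int) (last : Option Int) (avs occs : List Int)
    (hav : avs.Pairwise (· ≤ ·)) (hoc : occs.Pairwise (· ≤ ·))
    (hinv : GapsOK d last occs) :
    ∀ r ≤ gcount d last avs occs, Feas d last avs occs r := by
  intro r hr
  match avs, occs with
  | [], occs =>
    simp [gcount] at hr; subst hr
    exact ⟨[], List.nil_sublist _, rfl, by simpa [mrg] using hinv⟩
  | p :: avs, q :: occs =>
    rw [gcount] at hr
    have hge : ∀ x ∈ p :: avs, p ≤ x := by
      intro x hx
      rcases List.mem_cons.1 hx with rfl | hx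
      · exact le_refl x
      · exact (List.pairwise_cons.1 hav).1 x hx
    split at hr
    · next hqp =>
      obtain ⟨S, hsub, hlen, hg⟩ :=
        gcount_sound d (some q) (p :: avs) occs hav (List.pairwise_cons.1 hoc).2 hinv.2 r hr
      refine ⟨S, hsub, hlen, ?_⟩
      rw [mrg_cons_right _ _ _ (fun x hx => le_trans hqp (hge x (hsub.subset hx)))]
      exact ⟨hinv.1, hg⟩
    · split at hr
      · next hqp hcond =>
        match r, hr with
        | 0, _ => exact ⟨[], List.nil_sublist _, rfl, by simpa [mrg] using hinv⟩
        | r + 1, hr =>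
          have hinv' : GapsOK d (some p) (q :: occs) := by
            refine ⟨?_, hinv.2⟩
            intro a ha
            simp only [Option.mem_def, Option.some.injEq] at ha; subst ha
            exact hcond.2
          obtain ⟨S, hsub, hlen, hg⟩ :=
            gcount_sound d (some p) avs (q :: occs) (List.pairwise_cons.1 hav).2 hoc hinv'
              r (by omega)
          refine ⟨p :: S, hsub.cons_cons p, by simp [hlen], ?_⟩
          rw [mrg_cons_left _ _ _ (by
            intro y hy
            rcases List.mem_cons.1 hy with rfl | hy
            · omega
            · have := (List.pairwise_cons.1 hoc).1 y hy; omega)]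
          exact ⟨hcond.1, hg⟩
      · obtain ⟨S, hsub, hlen, hg⟩ :=
          gcount_sound d last avs (q :: occs) (List.pairwise_cons.1 hav).2 hoc hinv r hr
        exact ⟨S, hsub.cons p, hlen, hg⟩
  | p :: avs, [] =>
    rw [gcount] at hr
    split at hr
    · next hcond =>
      match r, hr with
      | 0, _ => exact ⟨[], List.nil_sublist _, rfl, by simpa [mrg] using hinv⟩
      | r + 1, hr =>
        obtain ⟨S, hsub, hlen, hg⟩ :=
          gcount_sound d (some p) avs [] (List.pairwise_cons.1 hav).2 hoc trivial r (by omega)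
        refine ⟨p :: S, hsub.cons_cons p, by simp [hlen], ?_⟩
        rw [mrg_nil_right] at hg ⊢
        exact ⟨hcond, hg⟩
    · obtain ⟨S, hsub, hlen, hg⟩ :=
        gcount_sound d last avs [] (List.pairwise_cons.1 hav).2 hoc hinv r hr
      exact ⟨S, hsub.cons p, hlen, hg⟩
  termination_by avs.length + occs.length

theorem gcount_opt (d : Int) (last : Option Int) (avs occs : List Int)
    (hav : avs.Pairwise (· ≤ ·)) (hoc : occs.Pairwise (· ≤ ·))
    (hchain : GapsOK d none occs) :
    ∀ S : List Int, S.Sublist avs → GapsOK d last (mrg S occs) →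
      S.length ≤ gcount d last avs occs := by
  intro S hsub hg
  match avs, occs with
  | [], occs =>
    have : S = [] := List.sublist_nil.1 hsub
    subst this; simp [gcount]
  | p :: avs, q :: occs =>
    have hge : ∀ x ∈ p :: avs, p ≤ x := by
      intro x hx
      rcases List.mem_cons.1 hx with rfl | hx
      · exact le_refl x
      · exact (List.pairwise_cons.1 hav).1 x hx
    rw [gcount]
    split
    · next hqp =>
      rw [mrg_cons_right _ _ _ (fun x hx => le_trans hqp (hge x (hsub.subset hx)))] at hg
      exact gcount_opt d (some q) (p :: avs) occs hav (List.pairwise_cons.1 hoc).2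
        (gapsOK_weaken_none d q occs hchain.2) S hsub hg.2
    · next hqp =>
      have hpq : p < q := by omega
      have hSsorted : S.Pairwise (· ≤ ·) := hav.sublist hsub
      split
      · next hcond =>
        -- greedy places p: exchange argument
        match S, hsub with
        | [], _ => simp
        | s1 :: rest, hsub =>
          have hrest2 : rest.Sublist avs := by
            rcases List.sublist_cons_iff.1 hsub with h1 | ⟨t, ht, h2⟩
            · exact (List.sublist_cons_self s1 rest).trans h1
            · cases ht; exact h2
          have hps1 : p ≤ s1 := hge s1 (hsub.subset (by simp))
          have hex : GapsOK d (some p) (mrg rest (q :: occs)) :=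
            gapsOK_exchange d (q :: occs) hoc hchain p s1 rest last hps1
              (List.pairwise_cons.1 hSsorted).1
              (by intro q' hq'; cases hq'; exact hcond.2) hg
          have := gcount_opt d (some p) avs (q :: occs) (List.pairwise_cons.1 hav).2 hoc
            hchain rest hrest2 hex
          simp; omega
      · next hcond =>
        -- greedy skips p: p cannot be in any valid choice
        rcases List.sublist_cons_iff.1 hsub with h1 | ⟨t, ht, h2⟩
        · exact gcount_opt d last avs (q :: occs) (List.pairwise_cons.1 hav).2 hoc hchain S h1 hg
        · exfalso
          subst ht
          rw [mrg_cons_left _ _ _ (by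
            intro y hy
            rcases List.mem_cons.1 hy with rfl | hy
            · omega
            · have := (List.pairwise_cons.1 hoc).1 y hy; omega)] at hg
          by_cases hleft : ∀ a ∈ last, d ≤ p - a
          · have hright : ¬ d ≤ q - p := fun hr => hcond ⟨hleft, hr⟩
            have hd : 0 ≤ d := by omega
            have hqmem : q ∈ mrg t (q :: occs) := mem_mrg.2 (Or.inr (by simp))
            have := gapsOK_reach d p (mrg t (q :: occs)) hd hg.2 q hqmem
            omega
          · push Not at hleft
            obtain ⟨a, ha, hlt⟩ := hleft
            have := hg.1 a ha
            omega
  | p :: avs, [] =>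
    rw [mrg_nil_right] at hg
    rw [gcount]
    have hSsorted : S.Pairwise (· ≤ ·) := hav.sublist hsub
    split
    · next hcond =>
      match S, hsub with
      | [], _ => simp
      | s1 :: rest, hsub =>
        have hrest2 : rest.Sublist avs := by
          rcases List.sublist_cons_iff.1 hsub with h1 | ⟨t, ht, h2⟩
          · exact (List.sublist_cons_self s1 rest).trans h1
          · cases ht; exact h2
        have hps1 : p ≤ s1 := by
          have : ∀ x ∈ p :: avs, p ≤ x := by
            intro x hx
            rcases List.mem_cons.1 hx with rfl | hx
            · exact le_refl x
            · exact (List.pairwise_cons.1 hav).1 x hx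
          exact this s1 (hsub.subset (by simp))
        have hex : GapsOK d (some p) (mrg rest []) := by
          rw [mrg_nil_right]
          exact gapsOK_weaken d p s1 rest hps1 hg.2
        have := gcount_opt d (some p) avs [] (List.pairwise_cons.1 hav).2 hoc hchain
          rest hrest2 hex
        simp; omega
    · next hcond =>
      rcases List.sublist_cons_iff.1 hsub with h1 | ⟨t, ht, h2⟩
      · rw [← mrg_nil_right S] at hg
        exact gcount_opt d last avs [] (List.pairwise_cons.1 hav).2 hoc hchain S h1 hg
      · exfalso
        subst ht
        push Not at hcond
        obtain ⟨a, ha, hlt⟩ := hcond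
        have := hg.1 a ha
        omega
  termination_by avs.length + occs.length

-- index formulation of the chain condition, as both ports compute it
theorem gapsOK_some_iff_idx (d : Int) (l : List Int) : ∀ a : Int,
    GapsOK d (some a) l ↔
      ∀ i, i + 1 < (a :: l).length → d ≤ (a :: l).getD (i + 1) 0 - (a :: l).getD i 0 := by
  induction l with
  | nil => intro a; simp [GapsOK]
  | cons x xs ih =>
    intro a
    constructor
    · intro h i hi
      match i with
      | 0 => simpa using h.1 a rfl
      | i + 1 =>
        have := ((ih x).1 h.2) i (by simpa using hi)
        simpa using this
    · intro h
      refine ⟨?_, (ih x).2 ?_⟩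
      · intro b hb
        simp only [Option.mem_def, Option.some.injEq] at hb; subst hb
        simpa using h 0 (by simp)
      · intro i hi
        have := h (i + 1) (by simpa using hi)
        simpa using this

theorem gapsOK_iff_idx (d : Int) (l : List Int) :
    GapsOK d none l ↔ ∀ i, i + 1 < l.length → d ≤ l.getD (i + 1) 0 - l.getD i 0 := by
  cases l with
  | nil => simp [GapsOK]
  | cons x xs =>
    constructor
    · intro h i hi
      exact (gapsOK_some_iff_idx d xs x).1 h.2 i hi
    · intro h
      exact ⟨by simp, (gapsOK_some_iff_idx d xs x).2 h⟩

theorem pvCombos_mem (r : Nat) (xs S : List Int) :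
    S ∈ pvCombos r xs ↔ S.Sublist xs ∧ S.length = r := by
  induction xs generalizing r S with
  | nil =>
    match r with
    | 0 =>
      simp only [pvCombos, List.mem_singleton]
      constructor
      · rintro rfl; exact ⟨List.nil_sublist _, rfl⟩
      · rintro ⟨h, hl⟩; exact List.length_eq_zero_iff.1 hl
    | r + 1 =>
      simp only [pvCombos, List.not_mem_nil, false_iff, not_and]
      intro h hl
      have := List.sublist_nil.1 h; subst this; simp at hl
  | cons x xs ih =>
    match r with
    | 0 =>
      simp only [pvCombos, List.mem_singleton]
      constructor
      · rintro rfl; exact ⟨List.nil_sublist _, rfl⟩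
      · rintro ⟨h, hl⟩; exact List.length_eq_zero_iff.1 hl
    | r + 1 =>
      simp only [pvCombos, List.mem_append, List.mem_map]
      constructor
      · rintro (⟨c, hc, rfl⟩ | h)
        · obtain ⟨hsub, hlen⟩ := (ih _ _).1 hc
          exact ⟨hsub.cons_cons x, by simp [hlen]⟩
        · obtain ⟨hsub, hlen⟩ := (ih _ _).1 h
          exact ⟨hsub.cons x, hlen⟩
      · rintro ⟨hsub, hlen⟩
        rcases List.sublist_cons_iff.1 hsub with h1 | ⟨t, ht, h2⟩
        · exact Or.inr ((ih _ _).2 ⟨h1, hlen⟩)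
        · subst ht
          exact Or.inl ⟨t, (ih _ _).2 ⟨h2, by simpa using hlen⟩, rfl⟩


-- ===== assembly: characterizing the two ports =====

def pvAvail (bc ob : List Int) : List Int :=
  bc.filter (fun bed => !(PySem.Set.contains (PySem.Set.ofList ob) bed))

def pvSort (l : List Int) : List Int := PySem.List.sorted l (fun x => x) false

theorem pvSort_perm (l : List Int) : (pvSort l).Perm l := PySem.List.sorted_perm l _ _

theorem pvSort_length (l : List Int) : (pvSort l).length = l.length :=
  (pvSort_perm l).length_eq

theorem pvSort_pairwise (l : List Int) : (pvSort l).Pairwise (· ≤ ·) := by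
  have := PySem.List.sorted_pairwise (xs := l) (key := fun x => x)
  simpa [pvSort] using this

theorem pvAvail_length (bc ob : List Int) :
    (pvAvail bc ob).length = (bc.filter (fun b => b ∉ ob)).length := by
  unfold pvAvail
  congr 1
  apply List.filter_congr
  intro x _
  simp [PySem.Set.contains]

theorem optElim_iff (o : Option Int) (P : Int → Prop) [DecidablePred P] :
    (o.elim true (fun x => decide (P x)) = true) ↔ ∀ a ∈ o, P a := by
  cases o <;> simp

theorem gstep (d : Int) (last : Option Int) (p : Int) (avs occs : List Int) :
    gcount d last (p :: avs) occs =
      (if (∀ a ∈ (pvPopLE last occs p).1, d ≤ p - a) ∧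
          (∀ q ∈ (pvPopLE last occs p).2.head?, d ≤ q - p)
       then 1 + gcount d (some p) avs (pvPopLE last occs p).2
       else gcount d (pvPopLE last occs p).1 avs (pvPopLE last occs p).2) := by
  induction occs generalizing last with
  | nil =>
    rw [gcount]
    simp only [pvPopLE]
    split_ifs with h1 h2 h2 <;> first
    | rfl
    | (exfalso; first
        | exact h2 ⟨h1, by intro q hq; simp at hq⟩
        | exact h1 h2.1)
  | cons q occs ih =>
    by_cases hqp : q ≤ p
    · rw [gcount, if_pos hqp]
      simp only [pvPopLE, if_pos hqp]
      exact ih (some q)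
    · rw [gcount, if_neg hqp]
      simp only [pvPopLE, if_neg hqp]
      split_ifs with h1 h2 h2 <;> first
      | rfl
      | (exfalso; first
          | exact h2 ⟨h1.1, by intro q' hq'; cases hq'; exact h1.2⟩
          | exact h1 ⟨h2.1, h2.2 q rfl⟩)

theorem foldB (d : Int) (avs : List Int) : ∀ (c : Int) (last : Option Int) (occs : List Int),
    (List.foldl (fun (st : Int × Option Int × List Int) p =>
        let pop := pvPopLE st.2.1 st.2.2 p
        if (pop.1.elim true (fun l => decide (d ≤ p - l))) &&
           (pop.2.head?.elim true (fun q => decide (d ≤ q - p))) then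
          (st.1 + 1, some p, pop.2)
        else (st.1, pop.1, pop.2)) (c, last, occs) avs).1
      = c + (gcount d last avs occs : Int) := by
  induction avs with
  | nil => intro c last occs; simp [gcount]
  | cons p avs ih =>
    intro c last occs
    rw [List.foldl_cons, gstep]
    by_cases hcond : (∀ a ∈ (pvPopLE last occs p).1, d ≤ p - a) ∧
        (∀ q ∈ (pvPopLE last occs p).2.head?, d ≤ q - p)
    · rw [if_pos hcond]
      have hb : ((pvPopLE last occs p).1.elim true (fun l => decide (d ≤ p - l)) &&
          (pvPopLE last occs p).2.head?.elim true (fun q => decide (d ≤ q - p))) = true := by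
        rw [Bool.and_eq_true, optElim_iff, optElim_iff]
        exact hcond
      simp only [hb, if_true]
      rw [ih]
      push_cast
      ring
    · rw [if_neg hcond]
      have hb : ((pvPopLE last occs p).1.elim true (fun l => decide (d ≤ p - l)) &&
          (pvPopLE last occs p).2.head?.elim true (fun q => decide (d ≤ q - p))) = false := by
        rw [Bool.eq_false_iff]
        intro hab
        rw [Bool.and_eq_true, optElim_iff, optElim_iff] at hab
        exact hcond hab
      simp only [hb, Bool.false_eq_true, if_false]
      rw [ih]

theorem Acheck_iff (d : Int) (L : List Int) (h2 : 2 ≤ L.length) :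
    ((match PySem.List.min? ((List.range (L.length - 1)).map
        (fun i => L.getD (i + 1) 0 - L.getD i 0)) (fun x => x) with
      | some md => decide (d ≤ md)
      | none => false) = true) ↔ GapsOK d none L := by
  cases hmin : PySem.List.min? ((List.range (L.length - 1)).map
      (fun i => L.getD (i + 1) 0 - L.getD i 0)) (fun x => x) with
  | none =>
    rw [PySem.List.min?_eq_none_iff] at hmin
    simp only [List.map_eq_nil_iff, List.range_eq_nil] at hmin
    omega
  | some md =>
    simp only [decide_eq_true_eq]
    constructor
    · intro hdm
      rw [gapsOK_iff_idx]
      intro i hi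
      have hmem : L.getD (i + 1) 0 - L.getD i 0 ∈ (List.range (L.length - 1)).map
          (fun i => L.getD (i + 1) 0 - L.getD i 0) :=
        List.mem_map.2 ⟨i, List.mem_range.2 (by omega), rfl⟩
      have hmin' := PySem.List.min?_isMin hmin _ hmem
      simp only at hmin'
      omega
    · intro hg
      have hmem := PySem.List.min?_mem hmin
      obtain ⟨i, hi, rfl⟩ := List.mem_map.1 hmem
      rw [List.mem_range] at hi
      exact (gapsOK_iff_idx d L).1 hg i (by omega)

theorem precheckB_iff (d : Int) (l : List Int) :
    ((List.range (l.length - 1)).any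
        (fun i => decide (l.getD (i + 1) 0 - l.getD i 0 < d)) = false) ↔ GapsOK d none l := by
  rw [Bool.eq_false_iff, Ne, List.any_eq_true, gapsOK_iff_idx]
  constructor
  · intro h i hi
    by_contra hlt
    exact h ⟨i, List.mem_range.2 (by omega), decide_eq_true (by omega)⟩
  · rintro h ⟨i, hi, hd⟩
    rw [List.mem_range] at hi
    simp only [decide_eq_true_eq] at hd
    have := h i (by omega)
    omega

theorem sortApp_congr (S S' ob : List Int) (h : S.Perm S') :
    pvSort (S ++ ob) = pvSort (S' ++ ob) :=
  PySem.List.sorted_eq_sorted_of_perm _ _ _ (fun _ _ h => h) (h.append_right ob)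

theorem sortApp_eq_mrg (S ob : List Int) (hS : S.Pairwise (· ≤ ·)) :
    pvSort (S ++ ob) = mrg S (pvSort ob) := by
  refine PySem.List.sorted_id_eq_of_perm_of_pairwise _ _ ?_ ?_
  · exact (mrg_perm _ _).trans (List.Perm.append_left S (pvSort_perm ob))
  · exact mrg_sorted S (pvSort ob) hS (pvSort_pairwise ob)

theorem exists_sublist_sorted (av : List Int) (r : Nat) (P : List Int → Prop)
    (hP : ∀ S S', S.Perm S' → P S → P S') :
    (∃ S, S.Sublist av ∧ S.length = r ∧ P S) ↔
      (∃ S, S.Sublist (pvSort av) ∧ S.length = r ∧ P S) := by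
  constructor
  · rintro ⟨S, hsub, hlen, hPS⟩
    have hsp : S.Subperm (pvSort av) := hsub.subperm.trans (pvSort_perm av).symm.subperm
    obtain ⟨u, hup, husub⟩ := hsp
    exact ⟨u, husub, hup.length_eq.trans hlen, hP S u hup.symm hPS⟩
  · rintro ⟨S, hsub, hlen, hPS⟩
    have hsp : S.Subperm av := hsub.subperm.trans (pvSort_perm av).subperm
    obtain ⟨u, hup, husub⟩ := hsp
    exact ⟨u, husub, hup.length_eq.trans hlen, hP S u hup.symm hPS⟩

theorem portA_eq (n : Int) (m : Int) (k : Int) (bc ob : List Int) (d : Int) :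
    can_place_entities_naive n m k bc ob d =
      (pvCombos n.toNat (pvAvail bc ob)).any (fun combo =>
        match PySem.List.min? ((List.range ((pvSort (combo ++ ob)).length - 1)).map
            (fun i => (pvSort (combo ++ ob)).getD (i + 1) 0 - (pvSort (combo ++ ob)).getD i 0))
            (fun x => x) with
        | some md => decide (d ≤ md)
        | none => false) := rfl

theorem portB_eq_pos (n : Int) (m : Int) (k : Int) (bc ob : List Int) (d : Int)
    (hocc : GapsOK d none (pvSort ob)) :
    can_place_entities_naive_alt n m k bc ob d =
      decide (n ≤ (0 : Int) + (gcount d none (pvSort (pvAvail bc ob)) (pvSort ob) : Int)) := by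
  simp only [can_place_entities_naive_alt]
  rw [(precheckB_iff d (PySem.List.sorted ob (fun x => x) false)).2 hocc]
  simp only [Bool.false_eq_true, if_false]
  rw [foldB]
  rfl

theorem portB_eq_neg (n : Int) (m : Int) (k : Int) (bc ob : List Int) (d : Int)
    (hocc : ¬ GapsOK d none (pvSort ob)) :
    can_place_entities_naive_alt n m k bc ob d = false := by
  simp only [can_place_entities_naive_alt]
  have : ¬ ((List.range ((PySem.List.sorted ob (fun x => x) false).length - 1)).any
      (fun i => decide ((PySem.List.sorted ob (fun x => x) false).getD (i + 1) 0 -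
        (PySem.List.sorted ob (fun x => x) false).getD i 0 < d)) = false) := by
    rw [precheckB_iff]; exact hocc
  rw [Bool.not_eq_false] at this
  rw [this]
  simp

-- ===== VERDICT (by name: the statement is the Claim_ definition above) =====
theorem can_place_entities_naive_spec : Claim_equal_can_place_entities_naive := by
  intro n m k bc ob d _ hpre
  unfold Spec_can_place_entities_naive
  obtain ⟨hn, hpre2⟩ := hpre
  rw [portA_eq]
  have havlen := pvAvail_length bc ob
  have hsavlen : (pvSort (pvAvail bc ob)).length = (pvAvail bc ob).length := pvSort_length _
  have hEx : ∀ r : Nat,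
      ((∃ S, S.Sublist (pvAvail bc ob) ∧ S.length = r ∧ GapsOK d none (pvSort (S ++ ob))) ↔
       (∃ S, S.Sublist (pvSort (pvAvail bc ob)) ∧ S.length = r ∧
          GapsOK d none (pvSort (S ++ ob)))) := by
    intro r
    refine exists_sublist_sorted (pvAvail bc ob) r _ ?_
    intro S S' hp hg
    rwa [sortApp_congr S' S ob hp.symm]
  by_cases hocc : GapsOK d none (pvSort ob)
  · rw [portB_eq_pos n m k bc ob d hocc]
    by_cases hshort : ((bc.filter (fun b => b ∉ ob)).length : Int) < n
    · -- too few available beds: both sides are False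
      have hnil : pvCombos n.toNat (pvAvail bc ob) = [] := by
        rw [List.eq_nil_iff_forall_not_mem]
        intro S hS
        obtain ⟨hsub, hlen⟩ := (pvCombos_mem _ _ _).1 hS
        have := hsub.length_le
        omega
      rw [hnil, List.any_nil, eq_comm, Bool.eq_false_iff, Ne, decide_eq_true_iff]
      have hgc := gcount_le d none (pvSort (pvAvail bc ob)) (pvSort ob)
      omega
    · have h2 : 2 ≤ n + ob.length := by
        rcases hpre2 with h | h
        · exact h
        · omega
      rw [Bool.eq_iff_iff, List.any_eq_true, decide_eq_true_iff]
      have hsound := gcount_sound d none (pvSort (pvAvail bc ob)) (pvSort ob)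
        (pvSort_pairwise _) (pvSort_pairwise _) hocc
      have hopt := gcount_opt d none (pvSort (pvAvail bc ob)) (pvSort ob)
        (pvSort_pairwise _) (pvSort_pairwise _) hocc
      constructor
      · rintro ⟨combo, hcombo, hchk⟩
        obtain ⟨hsub, hlen⟩ := (pvCombos_mem _ _ _).1 hcombo
        have hL2 : 2 ≤ (pvSort (combo ++ ob)).length := by
          rw [pvSort_length, List.length_append, hlen]
          omega
        have hg := (Acheck_iff d _ hL2).1 hchk
        obtain ⟨S, hSsub, hSlen, hSg⟩ := (hEx n.toNat).1 ⟨combo, hsub, hlen, hg⟩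
        have hSpw : S.Pairwise (· ≤ ·) := (pvSort_pairwise _).sublist hSsub
        rw [sortApp_eq_mrg S ob hSpw] at hSg
        have := hopt S hSsub hSg
        omega
      · intro hng
        obtain ⟨S, hSsub, hSlen, hSg⟩ := hsound n.toNat (by omega)
        have hSpw : S.Pairwise (· ≤ ·) := (pvSort_pairwise _).sublist hSsub
        rw [← sortApp_eq_mrg S ob hSpw] at hSg
        obtain ⟨S', hsub', hlen', hg'⟩ := (hEx n.toNat).2 ⟨S, hSsub, hSlen, hSg⟩
        refine ⟨S', (pvCombos_mem _ _ _).2 ⟨hsub', hlen'⟩, ?_⟩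
        have hL2 : 2 ≤ (pvSort (S' ++ ob)).length := by
          rw [pvSort_length, List.length_append, hlen']
          omega
        exact (Acheck_iff d _ hL2).2 hg'
  · rw [portB_eq_neg n m k bc ob d hocc]
    rw [List.any_eq_false]
    intro combo hcombo
    obtain ⟨hsub, hlen⟩ := (pvCombos_mem _ _ _).1 hcombo
    rcases hpre2 with h2 | hshort
    · intro hchk
      have hL2 : 2 ≤ (pvSort (combo ++ ob)).length := by
        rw [pvSort_length, List.length_append, hlen]
        omega
      have hg := (Acheck_iff d _ hL2).1 hchk
      have hperm : (pvSort combo).Perm combo := pvSort_perm combo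
      rw [sortApp_congr combo (pvSort combo) ob hperm.symm,
        sortApp_eq_mrg _ _ (pvSort_pairwise combo)] at hg
      exact hocc (gapsOK_rm d none (pvSort combo) (pvSort ob) (pvSort_pairwise _)
        (pvSort_pairwise _) (by intro a ha; cases ha) hg)
    · exfalso
      have := hsub.length_le
      omega
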